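-- pv_equiv track=rewrite | github.com/maximum-ml/testing-ml-algorithms | src/utilities/correlations/1D_correlations.py | sliding_dot_prod1
-- ===== SOURCE A (Python) =====
-- def sliding_dot_prod1(a: list, b: list) -> list:
--     result = []
--     for i in range(len(a) - len(b) + 1):
--         x = 0
--         for j in range(len(b)):
--             x += a[i + j] * b[j]
--         result.append(x)
--     return result
-- ===== SOURCE B (Python) =====
-- def sliding_dot_prod1(a: list, b: list) -> list:
--     n = len(a) - len(b) + 1
--     result = [0] * n
--     for j, bj in enumerate(b):
--         result = [result[i] + a[i + j] * bj for i in range(n)]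
--     return result
-- ===== Notes on version B (the rewrite author's own statement) =====
-- stated objective: alternative
-- what changed: Loops interchanged into an accumulator array: B allocates result = [0]*(len(a)-len(b)+1) once and sweeps the kernel on the outside, adding a[i+j]*b[j] into result[i] across m passes, instead of finishing each output with its own inner dot-product loop.
import Mathlib
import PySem

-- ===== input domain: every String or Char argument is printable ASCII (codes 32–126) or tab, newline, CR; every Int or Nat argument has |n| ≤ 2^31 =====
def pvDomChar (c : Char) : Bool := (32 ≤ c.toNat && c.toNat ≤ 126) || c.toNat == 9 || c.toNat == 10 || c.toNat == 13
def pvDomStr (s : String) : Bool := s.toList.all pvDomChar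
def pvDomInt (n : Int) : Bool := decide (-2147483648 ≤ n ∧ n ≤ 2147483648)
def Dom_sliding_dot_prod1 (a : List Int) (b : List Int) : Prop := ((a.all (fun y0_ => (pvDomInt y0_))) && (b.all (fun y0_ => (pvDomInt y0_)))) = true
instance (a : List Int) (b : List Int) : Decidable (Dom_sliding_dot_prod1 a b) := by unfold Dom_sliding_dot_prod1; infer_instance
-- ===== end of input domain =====

-- B replaces A's per-output inner dot-product loop with one accumulator array [0]*(len(a)-len(b)+1)
-- swept once per kernel element (loops interchanged, same addition order per output): an alternative
-- decomposition of the same O(n*m) computation.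

-- ===== PORT A =====
def sliding_dot_prod1 (a : List Int) (b : List Int) : List Int :=
  (PySem.List.pyRange 0 ((a.length : Int) - (b.length : Int) + 1)).foldl
    (fun result i =>
      result ++ [(PySem.List.pyRange 0 (b.length : Int)).foldl
        (fun x j => x + PySem.List.pyGetD a (i + j) 0 * PySem.List.pyGetD b j 0) 0])
    []

-- ===== PORT B =====
def sliding_dot_prod1_alt (a : List Int) (b : List Int) : List Int :=
  (PySem.List.enumerate b).foldl
    (fun result p =>
      (PySem.List.pyRange 0 ((a.length : Int) - (b.length : Int) + 1)).map
        (fun i => PySem.List.pyGetD result i 0 + PySem.List.pyGetD a (i + p.1) 0 * p.2))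
    (List.replicate ((a.length : Int) - (b.length : Int) + 1).toNat 0)

-- ===== PRECONDITION & SPEC =====
def Spec_sliding_dot_prod1 (a : List Int) (b : List Int) (out : List Int) : Prop := out = sliding_dot_prod1_alt a b
instance (a : List Int) (b : List Int) (out : List Int) : Decidable (Spec_sliding_dot_prod1 a b out) := by unfold Spec_sliding_dot_prod1; infer_instance

-- ===== CLAIM (what is proved, stated in full; the proofs are below) =====
def Claim_equal_sliding_dot_prod1 : Prop := ∀ (a : List Int) (b : List Int), Dom_sliding_dot_prod1 a b → Spec_sliding_dot_prod1 a b (sliding_dot_prod1 a b)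

-- ===== LEMMAS AND PROOFS =====

-- partial dot product of the kernel suffix cs (placed at absolute offset s) against window i of a
def pvDot (a : List Int) (i s : Int) : List Int → Int
  | [] => 0
  | c :: cs => PySem.List.pyGetD a (i + s) 0 * c + pvDot a i (s + 1) cs

-- A's inner loop computes x plus the partial dot product of the remaining kernel suffix
theorem pvInnerA (a b : List Int) (i : Int) :
    ∀ (cs : List Int) (s x : Int), 0 ≤ s → b.drop s.toNat = cs →
    (PySem.List.pyRange s (b.length : Int)).foldl
      (fun x j => x + PySem.List.pyGetD a (i + j) 0 * PySem.List.pyGetD b j 0) x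
    = x + pvDot a i s cs := by
  intro cs
  induction cs with
  | nil =>
    intro s x hs hdrop
    have hlen : (b.length : Int) ≤ s := by
      have := List.drop_eq_nil_iff.mp hdrop
      omega
    rw [PySem.List.pyRange_one_eq_nil hlen]
    simp [pvDot]
  | cons c cs ih =>
    intro s x hs hdrop
    have hlt : s.toNat < b.length := by
      by_contra h
      rw [List.drop_eq_nil_of_le (by omega)] at hdrop
      simp at hdrop
    have hsb : s < (b.length : Int) := by omega
    have hcons := List.drop_eq_getElem_cons hlt (l := b)
    rw [hcons] at hdrop
    have hc : b[s.toNat] = c := (List.cons.injEq _ _ _ _ ▸ hdrop).1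
    have hcs : b.drop (s.toNat + 1) = cs := (List.cons.injEq _ _ _ _ ▸ hdrop).2
    rw [PySem.List.pyRange_one_cons hsb]
    simp only [List.foldl_cons]
    have hget : PySem.List.pyGetD b s 0 = c := by
      rw [PySem.List.pyGetD_eq_getElem b 0 hs (by omega)]; exact hc
    rw [hget, ih (s + 1) _ (by omega) (by rw [show (s + 1).toNat = s.toNat + 1 by omega]; exact hcs)]
    simp [pvDot, add_assoc]

-- reading index i of a map over pyRange 0 n gives the mapped value
theorem pvGetMapRange (g : Int → Int) (n i : Int) (h0 : 0 ≤ i) (h1 : i < n) :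
    PySem.List.pyGetD ((PySem.List.pyRange 0 n).map g) i 0 = g i := by
  have hn : (PySem.List.pyRange 0 n) = PySem.List.pyRange 0 ((n.toNat : Int)) := by
    rw [PySem.List.pyRange_one, PySem.List.pyRange_one]
    congr 2
    omega
  rw [hn, show i = ((i.toNat : Int)) by omega]
  exact PySem.List.pyGetD_map_pyRange g n.toNat i.toNat 0 (by omega)

-- B's outer loop invariant: folding the kernel suffix cs (absolute offsets from s) over a state
-- of the shape (pyRange 0 n).map g adds the partial dot product pointwise
theorem pvBInv (a : List Int) (n : Int) :
    ∀ (cs : List Int) (s : Int) (g : Int → Int),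
    (PySem.List.enumerate cs s).foldl
      (fun result p =>
        (PySem.List.pyRange 0 n).map
          (fun i => PySem.List.pyGetD result i 0 + PySem.List.pyGetD a (i + p.1) 0 * p.2))
      ((PySem.List.pyRange 0 n).map g)
    = (PySem.List.pyRange 0 n).map (fun i => g i + pvDot a i s cs) := by
  intro cs
  induction cs with
  | nil =>
    intro s g
    rw [PySem.List.enumerate_nil]
    simp [pvDot]
  | cons c cs ih =>
    intro s g
    rw [PySem.List.enumerate_cons]
    simp only [List.foldl_cons]
    have hstep :
        (PySem.List.pyRange 0 n).map
          (fun i => PySem.List.pyGetD ((PySem.List.pyRange 0 n).map g) i 0 +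
            PySem.List.pyGetD a (i + s) 0 * c)
        = (PySem.List.pyRange 0 n).map
          (fun i => g i + PySem.List.pyGetD a (i + s) 0 * c) := by
      apply List.map_congr_left
      intro x hx
      have hm := PySem.List.mem_pyRange_one.mp hx
      rw [pvGetMapRange g n x hm.1 hm.2]
    rw [hstep, ih (s + 1) (fun i => g i + PySem.List.pyGetD a (i + s) 0 * c)]
    apply List.map_congr_left
    intro x _
    simp [pvDot, add_assoc]

-- ===== VERDICT (by name: the statement is the Claim_ definition above) =====
theorem sliding_dot_prod1_spec : Claim_equal_sliding_dot_prod1 := by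
  intro a b _
  unfold Spec_sliding_dot_prod1 sliding_dot_prod1 sliding_dot_prod1_alt
  rw [PySem.List.foldl_append_singleton_eq_map]
  have hrep : List.replicate ((a.length : Int) - (b.length : Int) + 1).toNat (0 : Int)
      = (PySem.List.pyRange 0 ((a.length : Int) - (b.length : Int) + 1)).map (fun _ => 0) := by
    rw [show (fun _ : Int => (0 : Int)) = Function.const Int 0 from rfl, List.map_const,
      PySem.List.length_pyRange_one]
    congr 1
    omega
  rw [hrep, pvBInv a ((a.length : Int) - (b.length : Int) + 1) b 0 (fun _ => 0)]
  simp only [List.nil_append]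
  apply List.map_congr_left
  intro i _
  rw [pvInnerA a b i b 0 0 le_rfl (by simp)]
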